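-- pv_equiv track=rewrite | github.com/gpucce/abstraction_ladder_resources | src/create_wordnet_data.py | prune_contiguous_subchains_by_synsets
-- ===== SOURCE A (Python) =====
-- from typing import Iterable, List, Tuple, Dict, Any, Optional, Set
--
-- def prune_contiguous_subchains_by_synsets(chains_syn: List[List[Any]]) -> List[List[Any]]:
--     """Remove chains whose synset list is a contiguous slice of another."""
--     drop = set()
--     order = sorted(range(len(chains_syn)), key=lambda i: len(chains_syn[i]))
--     def is_subset(a,b):
--         if len(a)>len(b): return False
--         for i in range(len(b)-len(a)+1):
--             if b[i:i+len(a)]==a: return True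
--         return False
--     for idx_i,i in enumerate(order):
--         if i in drop: continue
--         for j in order[idx_i+1:]:
--             if j in drop: continue
--             a,b=chains_syn[i],chains_syn[j]
--             if is_subset(a,b) and len(a)<len(b): drop.add(i); break
--             if is_subset(b,a) and len(b)<len(a): drop.add(j)
--     return [chains_syn[k] for k in range(len(chains_syn)) if k not in drop]
-- ===== SOURCE B (Python) =====
-- def prune_contiguous_subchains_by_synsets(chains_syn):
--     """Keep a chain unless it is a proper contiguous slice of some longer chain."""
--     def is_proper_infix(a, b):
--         return len(a) < len(b) and any(b[k:k + len(a)] == a for k in range(len(b) - len(a) + 1))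
--     return [c for c in chains_syn if not any(is_proper_infix(c, d) for d in chains_syn)]
-- ===== Notes on version B (the rewrite author's own statement) =====
-- stated objective: simpler
-- what changed: A sorts indices by length and mutates a drop-set in a nested index loop with break and a dead reverse branch; B is a direct one-comprehension filter keeping a chain iff it is not a proper contiguous slice of any longer chain (no sort, no drop set, no index bookkeeping).
import Mathlib
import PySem

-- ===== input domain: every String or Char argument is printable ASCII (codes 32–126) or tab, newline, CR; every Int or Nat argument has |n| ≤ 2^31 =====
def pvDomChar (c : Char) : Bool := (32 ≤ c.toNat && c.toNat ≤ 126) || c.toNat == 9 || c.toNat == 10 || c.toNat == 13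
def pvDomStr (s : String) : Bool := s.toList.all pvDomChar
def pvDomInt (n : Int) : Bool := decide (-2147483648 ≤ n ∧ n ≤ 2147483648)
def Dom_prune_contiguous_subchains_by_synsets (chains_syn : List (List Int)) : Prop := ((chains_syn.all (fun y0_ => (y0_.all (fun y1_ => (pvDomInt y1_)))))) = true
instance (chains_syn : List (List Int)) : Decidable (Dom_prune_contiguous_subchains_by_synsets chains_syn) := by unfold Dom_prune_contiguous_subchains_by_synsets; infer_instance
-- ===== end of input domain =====

-- B replaces A's sorted index order + mutated drop-set + nested break loop by a direct
-- filter: keep a chain iff it is not a proper contiguous slice of some longer chain (simpler).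

-- ===== PORT A =====

-- chains_syn[i]; the index is always in range where A evaluates it, so the default [] is never used
def pvGetChain (chains_syn : List (List Int)) (i : Int) : List Int :=
  PySem.List.pyGetD chains_syn i []

-- A's helper is_subset(a,b)
def pvIsSubset (a b : List Int) : Bool :=
  if a.length > b.length then false
  else (PySem.List.pyRange 0 ((b.length : Int) - (a.length : Int) + 1) 1).any
        (fun i => PySem.List.slice b (some i) (some (i + (a.length : Int))) == a)

-- A's inner 'for j in order[idx_i+1:]' loop (break = returning immediately after drop.add i)
def pvInnerA (chains_syn : List (List Int)) (i : Int) (rest : List Int)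
    (drop : PySem.Set Int) : PySem.Set Int :=
  match rest with
  | [] => drop
  | j :: tl =>
    if PySem.Set.contains drop j then pvInnerA chains_syn i tl drop
    else
      let a := pvGetChain chains_syn i
      let b := pvGetChain chains_syn j
      if pvIsSubset a b && decide (a.length < b.length) then PySem.Set.add drop i
      else if pvIsSubset b a && decide (b.length < a.length) then
        pvInnerA chains_syn i tl (PySem.Set.add drop j)
      else pvInnerA chains_syn i tl drop

-- A's outer 'for idx_i, i in enumerate(order)' loop; order[idx_i+1:] is the tail
def pvOuterA (chains_syn : List (List Int)) (pending : List Int)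
    (drop : PySem.Set Int) : PySem.Set Int :=
  match pending with
  | [] => drop
  | i :: tl =>
    if PySem.Set.contains drop i then pvOuterA chains_syn tl drop
    else pvOuterA chains_syn tl (pvInnerA chains_syn i tl drop)

def prune_contiguous_subchains_by_synsets (chains_syn : List (List Int)) : List (List Int) :=
  let n : Int := chains_syn.length
  let order := PySem.List.sorted (PySem.List.pyRange 0 n 1)
                 (fun i => ((pvGetChain chains_syn i).length : Int)) false
  let drop := pvOuterA chains_syn order PySem.Set.empty
  ((PySem.List.pyRange 0 n 1).filter (fun k => !(PySem.Set.contains drop k))).map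
    (fun k => pvGetChain chains_syn k)

-- ===== PORT B =====

-- Source B's is_proper_infix(a, b)
def pvIsProperInfix (a b : List Int) : Bool :=
  decide (a.length < b.length) &&
  (PySem.List.pyRange 0 ((b.length : Int) - (a.length : Int) + 1) 1).any
    (fun k => PySem.List.slice b (some k) (some (k + (a.length : Int))) == a)

def prune_contiguous_subchains_by_synsets_alt (chains_syn : List (List Int)) : List (List Int) :=
  chains_syn.filter (fun c => !(chains_syn.any (fun d => pvIsProperInfix c d)))

-- ===== PRECONDITION & SPEC =====
def Spec_prune_contiguous_subchains_by_synsets (chains_syn : List (List Int)) (out : List (List Int)) : Prop := out = prune_contiguous_subchains_by_synsets_alt chains_syn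
instance (chains_syn : List (List Int)) (out : List (List Int)) : Decidable (Spec_prune_contiguous_subchains_by_synsets chains_syn out) := by unfold Spec_prune_contiguous_subchains_by_synsets; infer_instance

-- ===== CLAIM (what is proved, stated in full; the proofs are below) =====
def Claim_equal_prune_contiguous_subchains_by_synsets : Prop := ∀ (chains_syn : List (List Int)), Dom_prune_contiguous_subchains_by_synsets chains_syn → Spec_prune_contiguous_subchains_by_synsets chains_syn (prune_contiguous_subchains_by_synsets chains_syn)

-- ===== LEMMAS AND PROOFS =====

-- condB: the only condition that ever fires in A's loops (the reverse branch is dead on a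
-- length-sorted order)
theorem pvCond_eq_properInfix (a b : List Int) :
    (pvIsSubset a b && decide (a.length < b.length)) = pvIsProperInfix a b := by
  unfold pvIsSubset pvIsProperInfix
  by_cases h : a.length < b.length
  · simp [h, Nat.not_lt.mpr (Nat.le_of_lt h), Bool.and_comm]
  · simp [h]

-- A's inner loop on a drop-free, length-nondecreasing suffix either drops i (break) or
-- leaves drop unchanged
theorem pvInnerA_char (cs : List (List Int)) (i : Int) :
    ∀ (rest : List Int) (drop : PySem.Set Int),
      (∀ j ∈ rest, j ∉ drop ∧ (pvGetChain cs i).length ≤ (pvGetChain cs j).length) →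
      pvInnerA cs i rest drop =
        (if rest.any (fun j => pvIsSubset (pvGetChain cs i) (pvGetChain cs j) &&
              decide ((pvGetChain cs i).length < (pvGetChain cs j).length))
         then PySem.Set.add drop i else drop) := by
  intro rest
  induction rest with
  | nil => intro drop _; simp [pvInnerA]
  | cons j tl ih =>
    intro drop h
    obtain ⟨hj, hlen⟩ := h j (List.mem_cons_self ..)
    have hrec := ih drop (fun x hx => h x (List.mem_cons_of_mem _ hx))
    by_cases hc : (pvIsSubset (pvGetChain cs i) (pvGetChain cs j) &&
        decide ((pvGetChain cs i).length < (pvGetChain cs j).length)) = true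
    · simp [pvInnerA, hj, hc]
    · have hrev : ¬ (pvGetChain cs j).length < (pvGetChain cs i).length := Nat.not_lt.mpr hlen
      simp [pvInnerA, hj, hc, hrev, hrec]

-- A's outer loop: on a nodup, length-sorted pending list disjoint from drop,
-- an index k ends up dropped iff some pending chain strictly longer than chain k contains it
theorem pvOuterA_char (cs : List (List Int)) :
    ∀ (pending : List Int) (drop : PySem.Set Int),
      pending.Nodup →
      pending.Pairwise (fun a b => (pvGetChain cs a).length ≤ (pvGetChain cs b).length) →
      (∀ j ∈ pending, j ∉ drop) →
      ∀ k, (k ∈ pvOuterA cs pending drop ↔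
        k ∈ drop ∨ (k ∈ pending ∧ ∃ j ∈ pending,
          pvIsSubset (pvGetChain cs k) (pvGetChain cs j) = true ∧
          (pvGetChain cs k).length < (pvGetChain cs j).length)) := by
  intro pending
  induction pending with
  | nil => intro drop _ _ _ k; simp [pvOuterA]
  | cons i tl ih =>
    intro drop hnd hpw hfree k
    have hi : i ∉ drop := hfree i (List.mem_cons_self ..)
    have hndtl : tl.Nodup := hnd.of_cons
    have hinotin : i ∉ tl := (List.nodup_cons.mp hnd).1
    have hpwtl : tl.Pairwise (fun a b => (pvGetChain cs a).length ≤ (pvGetChain cs b).length) :=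
      hpw.of_cons
    have hhead : ∀ j ∈ tl, (pvGetChain cs i).length ≤ (pvGetChain cs j).length :=
      fun j hj => (List.pairwise_cons.mp hpw).1 j hj
    have hfreetl : ∀ j ∈ tl, j ∉ drop := fun j hj => hfree j (List.mem_cons_of_mem _ hj)
    have hinner := pvInnerA_char cs i tl drop (fun j hj => ⟨hfreetl j hj, hhead j hj⟩)
    by_cases hany : tl.any (fun j => pvIsSubset (pvGetChain cs i) (pvGetChain cs j) &&
        decide ((pvGetChain cs i).length < (pvGetChain cs j).length)) = true
    · -- i gets dropped
      have hfree' : ∀ j ∈ tl, j ∉ PySem.Set.add drop i := by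
        intro j hj
        rw [PySem.Set.mem_add]
        rintro (hmem | rfl)
        · exact hfreetl j hj hmem
        · exact hinotin hj
      have hrec := ih (PySem.Set.add drop i) hndtl hpwtl hfree' k
      rw [pvOuterA, if_neg (by simpa using hi), hinner, if_pos hany, hrec, PySem.Set.mem_add]
      obtain ⟨j0, hj0, hc0⟩ := List.any_eq_true.mp hany
      simp only [Bool.and_eq_true, decide_eq_true_eq] at hc0
      constructor
      · rintro (⟨hk | rfl⟩ | ⟨hk, j, hj, hc⟩)
        · exact Or.inl hk
        · exact Or.inr ⟨List.mem_cons_self .., j0, List.mem_cons_of_mem _ hj0, hc0.1, hc0.2⟩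
        · exact Or.inr ⟨List.mem_cons_of_mem _ hk, j, List.mem_cons_of_mem _ hj, hc⟩
      · rintro (hk | ⟨hk, j, hj, hc⟩)
        · exact Or.inl (Or.inl hk)
        · rcases List.mem_cons.mp hk with rfl | hk'
          · exact Or.inl (Or.inr rfl)
          · rcases List.mem_cons.mp hj with rfl | hj'
            · exact absurd hc.2 (Nat.not_lt.mpr (hhead k hk'))
            · exact Or.inr ⟨hk', j, hj', hc⟩
    · -- nothing longer contains chain i: i stays
      have hrec := ih drop hndtl hpwtl hfreetl k
      rw [pvOuterA, if_neg (by simpa using hi), hinner, if_neg hany, hrec]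
      constructor
      · rintro (hk | ⟨hk, j, hj, hc⟩)
        · exact Or.inl hk
        · exact Or.inr ⟨List.mem_cons_of_mem _ hk, j, List.mem_cons_of_mem _ hj, hc⟩
      · rintro (hk | ⟨hk, j, hj, hc⟩)
        · exact Or.inl hk
        · rcases List.mem_cons.mp hj with rfl | hj'
          · rcases List.mem_cons.mp hk with rfl | hk'
            · exact absurd hc.2 (lt_irrefl _)
            · exact absurd hc.2 (Nat.not_lt.mpr (hhead k hk'))
          · rcases List.mem_cons.mp hk with rfl | hk'
            · exact absurd (List.any_eq_true.mpr ⟨j, hj', by simp [hc.1, hc.2]⟩) hany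
            · exact Or.inr ⟨hk', j, hj', hc⟩

-- position-filtered index comprehension over range(len(xs)) is an element filter (Nat form)
theorem pvMapFilterRangeNat (xs : List (List Int)) (p : List Int → Bool) :
    ((List.range xs.length).filter (fun k => p (xs.getD k []))).map (fun k => xs.getD k []) =
      xs.filter p := by
  induction xs with
  | nil => simp
  | cons x tl ih =>
    rw [List.length_cons, List.range_succ_eq_map]
    simp only [List.filter_cons, List.getD_cons_zero, List.filter_map]
    by_cases hp : p x = true
    · simp only [hp, if_true, List.map_cons]
      congr 1
      rw [← ih]
      simp [Function.comp_def]
    · simp only [hp, Bool.false_eq_true, if_false]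
      rw [← ih]
      simp [Function.comp_def]

-- ===== VERDICT (by name: the statement is the Claim_ definition above) =====
theorem prune_contiguous_subchains_by_synsets_spec : Claim_equal_prune_contiguous_subchains_by_synsets := by
  intro cs _
  unfold Spec_prune_contiguous_subchains_by_synsets
  unfold prune_contiguous_subchains_by_synsets prune_contiguous_subchains_by_synsets_alt
  simp only []
  set n : Int := (cs.length : Int) with hn
  set key : Int → Int := fun i => ((pvGetChain cs i).length : Int) with hkey
  set order := PySem.List.sorted (PySem.List.pyRange 0 n 1) key false with horder
  have hperm : order.Perm (PySem.List.pyRange 0 n 1) := PySem.List.sorted_perm ..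
  have hnd : order.Nodup := hperm.nodup_iff.mpr (PySem.List.nodup_pyRange_one ..)
  have hpw : order.Pairwise (fun a b => (pvGetChain cs a).length ≤ (pvGetChain cs b).length) := by
    have := PySem.List.sorted_pairwise (xs := PySem.List.pyRange 0 n 1) (key := key)
    exact this.imp (fun h => by simpa [hkey] using h)
  have hmemo : ∀ x : Int, x ∈ order ↔ (0 ≤ x ∧ x < n) := by
    intro x
    rw [hperm.mem_iff, PySem.List.mem_pyRange_one]
  have hchar := pvOuterA_char cs order PySem.Set.empty hnd hpw
    (by intro j _; simp [PySem.Set.empty])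
  -- dropped k ⟺ chain k is a proper contiguous slice of some chain of cs
  have hdrop : ∀ k : Int, 0 ≤ k → k < n →
      (PySem.Set.contains (pvOuterA cs order PySem.Set.empty) k =
        cs.any (fun d => pvIsProperInfix (pvGetChain cs k) d)) := by
    intro k hk0 hkn
    have hemp : (PySem.Set.empty : PySem.Set Int) = [] := rfl
    have hiff := hchar k
    rw [hemp] at hiff
    simp only [List.not_mem_nil, false_or] at hiff
    rw [Bool.eq_iff_iff, PySem.Set.contains_iff, hemp, hiff, List.any_eq_true]
    constructor
    · rintro ⟨-, j, hj, hsub, hlt⟩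
      obtain ⟨hj0, hjn⟩ := (hmemo j).mp hj
      refine ⟨pvGetChain cs j, ?_, ?_⟩
      · rw [pvGetChain, PySem.List.pyGetD_eq_getElem cs (d := []) hj0 (by omega)]
        exact List.getElem_mem _
      · rw [← pvCond_eq_properInfix]
        simp [hsub, hlt]
    · rintro ⟨d, hd, hpi⟩
      obtain ⟨m, hm, rfl⟩ := List.getElem_of_mem hd
      have hgm : pvGetChain cs (m : Int) = cs[m] := by
        rw [pvGetChain, PySem.List.pyGetD_eq_getElem cs (d := []) (by positivity)
          (by exact_mod_cast hm)]
        simp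
      rw [← pvCond_eq_properInfix, Bool.and_eq_true, decide_eq_true_eq] at hpi
      exact ⟨(hmemo k).mpr ⟨hk0, hkn⟩,
        (m : Int), (hmemo (m : Int)).mpr ⟨by positivity, by rw [hn]; exact_mod_cast hm⟩,
        by rw [hgm]; exact hpi.1, by rw [hgm]; exact hpi.2⟩
  -- rewrite the index filter to an element filter and conclude
  rw [List.filter_congr (l := PySem.List.pyRange 0 n 1)
      (q := fun k => !(cs.any (fun d => pvIsProperInfix (pvGetChain cs k) d)))
      (by intro x hx
          obtain ⟨hx0, hxn⟩ := PySem.List.mem_pyRange_one.mp hx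
          rw [hdrop x hx0 hxn])]
  have hrange : PySem.List.pyRange 0 n 1 = (List.range cs.length).map (fun k : Nat => (k : Int)) := by
    rw [PySem.List.pyRange_one]
    simp [hn]
  rw [hrange, List.filter_map, List.map_map]
  have hgetc : ∀ k : Nat, pvGetChain cs (k : Int) = cs.getD k [] := by
    intro k; rw [pvGetChain, PySem.List.pyGetD_natCast]
  rw [← pvMapFilterRangeNat cs (fun c => !(cs.any (fun d => pvIsProperInfix c d)))]
  congr 1
  · funext k; simp [Function.comp, hgetc]
  · congr 1; funext k; simp [Function.comp, hgetc]
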